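-- pv_equiv track=rewrite | github.com/thupchnsky/2DDNA | utils/conversion.py | diff_dec
-- ===== SOURCE A (Python) =====
-- def diff_dec(l):
--     # Differential decoding. Update value when -1 appears
--     result_l = [l[1]]
--     i = 2
--     while i < len(l):
--         if l[i] == -1:
--             if i + 1 < len(l):
--                 result_l += [l[i+1]]
--                 i = i + 2
--             else:
--                 return result_l
--         else:
--             result_l += [l[i] + result_l[-1]]
--             i += 1
--     return result_l
-- ===== SOURCE B (Python) =====
-- def diff_dec(l):
--     # Two-phase decomposition: split into segments [base, d1, d2, ...],
--     # then expand each segment by running prefix sums and concatenate.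
--     first = l[1]
--     segments = [[first]]
--     i = 2
--     n = len(l)
--     while i < n:
--         if l[i] == -1:
--             if i + 1 >= n:
--                 break
--             segments.append([l[i + 1]])
--             i += 2
--         else:
--             segments[-1].append(l[i])
--             i += 1
--     out = []
--     for seg in segments:
--         acc = 0
--         for d in seg:
--             acc += d
--             out.append(acc)
--     return out
-- ===== Notes on version B (the rewrite author's own statement) =====
-- stated objective: alternative
-- what changed: B splits the input once into diff segments (a -1 marker starting a new segment with the following element as base) and then expands each segment with an independent prefix-sum pass, instead of A's single loop that keeps re-reading the last element of the growing result list.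
import Mathlib
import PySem

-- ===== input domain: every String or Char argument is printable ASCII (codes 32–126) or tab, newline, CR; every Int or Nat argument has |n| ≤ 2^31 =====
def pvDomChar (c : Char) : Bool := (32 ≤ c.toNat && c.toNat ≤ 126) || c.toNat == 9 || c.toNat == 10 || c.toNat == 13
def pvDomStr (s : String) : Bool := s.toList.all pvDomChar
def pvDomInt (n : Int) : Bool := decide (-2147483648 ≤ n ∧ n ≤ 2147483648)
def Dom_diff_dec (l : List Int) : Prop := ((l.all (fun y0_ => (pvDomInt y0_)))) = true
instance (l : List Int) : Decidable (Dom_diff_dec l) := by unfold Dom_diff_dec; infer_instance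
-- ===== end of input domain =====

-- B replaces A's single running-sum loop by a two-phase decomposition (collect diff
-- segments, then expand each by prefix sums); objective: alternative, not faster.

-- ===== PORT A =====
-- the while loop of A: state (i, result_l); result_l[-1] read via getLast?
def diffDecLoop (l : List Int) (i : Nat) (res : List Int) : List Int :=
  if _h : i < l.length then
    if l.getD i 0 = -1 then
      if i + 1 < l.length then
        diffDecLoop l (i + 2) (res ++ [l.getD (i + 1) 0])
      else res
    else
      diffDecLoop l (i + 1) (res ++ [l.getD i 0 + res.getLast?.getD 0])
  else res
termination_by l.length - i

def diff_dec (l : List Int) : List Int :=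
  diffDecLoop l 2 [(PySem.List.pyGet? l 1).getD 0]

-- ===== PORT B =====
-- segments[-1].append(d)
def appendLast (segs : List (List Int)) (d : Int) : List (List Int) :=
  match segs with
  | [] => []
  | [s] => [s ++ [d]]
  | s :: rest => s :: appendLast rest d

-- B's first while loop: collect the segments
def collectSegs (l : List Int) (i : Nat) (segs : List (List Int)) : List (List Int) :=
  if _h : i < l.length then
    if l.getD i 0 = -1 then
      if i + 1 < l.length then
        collectSegs l (i + 2) (segs ++ [[l.getD (i + 1) 0]])
      else segs
    else
      collectSegs l (i + 1) (appendLast segs (l.getD i 0))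
  else segs
termination_by l.length - i

-- B's inner expansion loop: prefix sums of one segment starting from acc
def accumSeg (seg : List Int) (acc : Int) : List Int :=
  match seg with
  | [] => []
  | d :: rest => (acc + d) :: accumSeg rest (acc + d)

def diff_dec_alt (l : List Int) : List Int :=
  (collectSegs l 2 [[(PySem.List.pyGet? l 1).getD 0]]).flatMap (fun s => accumSeg s 0)

-- ===== PRECONDITION & SPEC =====
-- Pre excludes exactly the inputs where A raises IndexError (l[1] with len(l) < 2);
-- B raises there too.
def Pre_diff_dec (l : List Int) : Prop := 2 ≤ l.length
instance (l : List Int) : Decidable (Pre_diff_dec l) := by unfold Pre_diff_dec; infer_instance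
def pvWitness_diff_dec : List Int := [7, 3, 1, -1, 5, 2]

def Spec_diff_dec (l : List Int) (out : List Int) : Prop := out = diff_dec_alt l
instance (l : List Int) (out : List Int) : Decidable (Spec_diff_dec l out) := by unfold Spec_diff_dec; infer_instance

-- ===== CLAIM (what is proved, stated in full; the proofs are below) =====
def Claim_equal_diff_dec : Prop := ∀ (l : List Int), Dom_diff_dec l → Pre_diff_dec l → Spec_diff_dec l (diff_dec l)

-- ===== LEMMAS AND PROOFS =====

def expandSegs (segs : List (List Int)) : List Int := segs.flatMap (fun s => accumSeg s 0)

theorem accumSeg_append (s : List Int) (d : Int) (a : Int) :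
    accumSeg (s ++ [d]) a = accumSeg s a ++ [a + s.sum + d] := by
  induction s generalizing a with
  | nil => simp [accumSeg]
  | cons x xs ih => simp [accumSeg, ih, add_assoc]

theorem accumSeg_ne_nil (s : List Int) (a : Int) (h : s ≠ []) : accumSeg s a ≠ [] := by
  cases s with
  | nil => exact absurd rfl h
  | cons x xs => simp [accumSeg]

theorem accumSeg_getLast (s : List Int) (a : Int) (h : s ≠ []) :
    (accumSeg s a).getLast?.getD 0 = a + s.sum := by
  induction s generalizing a with
  | nil => exact absurd rfl h
  | cons x xs ih =>
    cases xs with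
    | nil => simp [accumSeg]
    | cons y ys =>
      have hne : accumSeg (y :: ys) (a + x) ≠ [] := accumSeg_ne_nil _ _ (by simp)
      have hc : accumSeg (x :: y :: ys) a = [a + x] ++ accumSeg (y :: ys) (a + x) := by
        simp [accumSeg]
      rw [hc, List.getLast?_append_of_ne_nil _ hne, ih (a + x) (by simp)]
      simp; ring

theorem appendLast_concat (pre : List (List Int)) (cur : List Int) (d : Int) :
    appendLast (pre ++ [cur]) d = pre ++ [cur ++ [d]] := by
  induction pre with
  | nil => simp [appendLast]
  | cons s rest ih =>
    cases rest with
    | nil => simp [appendLast]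
    | cons t ts => simpa [appendLast] using ih

theorem expandSegs_concat (pre : List (List Int)) (cur : List Int) :
    expandSegs (pre ++ [cur]) = expandSegs pre ++ accumSeg cur 0 := by
  simp [expandSegs]

theorem expandSegs_getLast (pre : List (List Int)) (cur : List Int) (h : cur ≠ []) :
    (expandSegs (pre ++ [cur])).getLast?.getD 0 = cur.sum := by
  rw [expandSegs_concat, List.getLast?_append_of_ne_nil _ (accumSeg_ne_nil cur 0 h)]
  simpa using accumSeg_getLast cur 0 h

theorem loop_eq_collect (l : List Int) (i : Nat) (pre : List (List Int)) (cur : List Int)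
    (hcur : cur ≠ []) :
    diffDecLoop l i (expandSegs (pre ++ [cur])) = expandSegs (collectSegs l i (pre ++ [cur])) := by
  by_cases h : i < l.length
  · by_cases hm : l.getD i 0 = -1
    · by_cases hn : i + 1 < l.length
      · rw [diffDecLoop, collectSegs, dif_pos h, dif_pos h, if_pos hm, if_pos hm,
          if_pos hn, if_pos hn]
        have hb : expandSegs (pre ++ [cur]) ++ [l.getD (i + 1) 0]
            = expandSegs ((pre ++ [cur]) ++ [[l.getD (i + 1) 0]]) := by
          simp [expandSegs, accumSeg]
        rw [hb, loop_eq_collect l (i + 2) (pre ++ [cur]) [l.getD (i + 1) 0] (by simp)]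
      · rw [diffDecLoop, collectSegs, dif_pos h, dif_pos h, if_pos hm, if_pos hm,
          if_neg hn, if_neg hn]
    · rw [diffDecLoop, collectSegs, dif_pos h, dif_pos h, if_neg hm, if_neg hm,
        appendLast_concat]
      have hb : expandSegs (pre ++ [cur]) ++
            [l.getD i 0 + (expandSegs (pre ++ [cur])).getLast?.getD 0]
          = expandSegs (pre ++ [cur ++ [l.getD i 0]]) := by
        rw [expandSegs_getLast pre cur hcur, expandSegs_concat, expandSegs_concat,
          accumSeg_append]
        simp [add_comm]
      rw [hb]
      exact loop_eq_collect l (i + 1) pre (cur ++ [l.getD i 0]) (by simp)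
  · rw [diffDecLoop, collectSegs, dif_neg h, dif_neg h]
termination_by l.length - i

-- ===== VERDICT (by name: the statement is the Claim_ definition above) =====
theorem diff_dec_spec : Claim_equal_diff_dec := by
  intro l _hd _hp
  unfold Spec_diff_dec diff_dec diff_dec_alt
  have h1 := loop_eq_collect l 2 [] [(PySem.List.pyGet? l 1).getD 0] (by simp)
  simp only [List.nil_append, expandSegs] at h1
  simpa [accumSeg] using h1
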